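-- pv_equiv track=rewrite | github.com/AlexeyBudyak/CodeWars | python-kata-7kyu/sort-out-the-men-from-boys.py | men_from_boys
-- ===== SOURCE A (Python) =====
-- def men_from_boys(arr):
--     men = []
--     boys = []
--     for el in set(arr):
--         if el % 2:  boys.append(el)
--         else:       men.append(el)
--     result = sorted(men) + sorted(boys, reverse = True)
--     return result
-- ===== SOURCE B (Python) =====
-- def men_from_boys(arr):
--     # One sort with a composite key that encodes the whole target order:
--     # evens (key[0]=0) before odds (key[0]=1); evens ascending (key[1]=x),
--     # odds descending (key[1]=-x). No partitioning, no second sort, no reverse.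
--     return sorted(set(arr), key=lambda x: (x % 2, -x if x % 2 else x))
-- ===== Notes on version B (the rewrite author's own statement) =====
-- stated objective: simpler
-- what changed: replaces the partition-into-two-lists plus two separate sorts with a single sort of the deduped input under a composite key (parity, then x for evens / -x for odds) that encodes the whole target order
import Mathlib
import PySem

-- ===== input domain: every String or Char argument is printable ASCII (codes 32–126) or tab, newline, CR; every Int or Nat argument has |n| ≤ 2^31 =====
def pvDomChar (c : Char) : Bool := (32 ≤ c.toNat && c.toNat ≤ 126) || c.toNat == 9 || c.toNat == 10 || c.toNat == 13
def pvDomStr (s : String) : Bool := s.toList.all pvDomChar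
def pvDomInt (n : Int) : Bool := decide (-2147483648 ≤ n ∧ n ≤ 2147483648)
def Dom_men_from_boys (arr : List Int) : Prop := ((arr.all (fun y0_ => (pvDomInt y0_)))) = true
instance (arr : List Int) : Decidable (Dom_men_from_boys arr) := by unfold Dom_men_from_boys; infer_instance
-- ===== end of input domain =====

-- B replaces A's partition-plus-two-sorts by ONE sort of the deduped input under a
-- composite key (parity, then x for evens / -x for odds) that encodes the target order.

-- ===== PORT A =====
def men_from_boys (arr : List Int) : List Int :=
  let mb := (PySem.Set.ofList arr).foldl
      (fun (p : List Int × List Int) el =>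
        if PySem.Int.mod el 2 ≠ 0 then (p.1, p.2 ++ [el]) else (p.1 ++ [el], p.2))
      ([], [])
  PySem.List.sorted mb.1 (fun x : Int => x) ++ PySem.List.sorted mb.2 (fun x : Int => x) true

-- ===== PORT B =====
def men_from_boys_alt (arr : List Int) : List Int :=
  PySem.List.sorted2 (PySem.Set.ofList arr)
    (fun x => PySem.Int.mod x 2)
    (fun x => if PySem.Int.mod x 2 ≠ 0 then -x else x)

-- ===== PRECONDITION & SPEC =====
def Spec_men_from_boys (arr : List Int) (out : List Int) : Prop := out = men_from_boys_alt arr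
instance (arr : List Int) (out : List Int) : Decidable (Spec_men_from_boys arr out) := by unfold Spec_men_from_boys; infer_instance

-- ===== CLAIM (what is proved, stated in full; the proofs are below) =====
def Claim_equal_men_from_boys : Prop := ∀ (arr : List Int), Dom_men_from_boys arr → Spec_men_from_boys arr (men_from_boys arr)

-- ===== LEMMAS AND PROOFS =====

-- A's pair-accumulating loop is the two filters of its input.
theorem pv_fold_pair (l : List Int) (m b : List Int) :
    l.foldl (fun (p : List Int × List Int) el =>
        if PySem.Int.mod el 2 ≠ 0 then (p.1, p.2 ++ [el]) else (p.1 ++ [el], p.2)) (m, b)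
    = (m ++ l.filter (fun x => PySem.Int.mod x 2 = 0),
       b ++ l.filter (fun x => PySem.Int.mod x 2 ≠ 0)) := by
  induction l generalizing m b with
  | nil => simp
  | cons x xs ih =>
    have hm : PySem.Int.mod x 2 = x % 2 := PySem.Int.mod_eq_emod_of_pos (by norm_num)
    by_cases h : x % 2 = 0
    · rw [List.foldl_cons, if_neg (by simp [h]), ih]
      rw [List.filter_cons, List.filter_cons,
        if_pos (by simp [h]), if_neg (by simp [h])]
      simp
    · rw [List.foldl_cons, if_pos (by simp [h]), ih]
      rw [List.filter_cons, List.filter_cons,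
        if_neg (by simp [h]), if_pos (by simp [h])]
      simp

theorem pv_sorted_filter (arr : List Int) (p : Int → Bool) :
    PySem.List.sorted ((PySem.Set.ofList arr).filter p) (fun x : Int => x) false
    = (PySem.List.sorted (PySem.Set.ofList arr) (fun x : Int => x) false).filter p := by
  apply PySem.List.sorted_eq_of_perm_of_pairwise_lt
  · exact (PySem.List.sorted_perm (PySem.Set.ofList arr) (fun x : Int => x) false).filter p
  · exact (PySem.List.sorted_ofList_pairwise_lt arr).filter p

theorem pv_sorted_rev_filter (arr : List Int) (p : Int → Bool) :
    PySem.List.sorted ((PySem.Set.ofList arr).filter p) (fun x : Int => x) true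
    = ((PySem.List.sorted (PySem.Set.ofList arr) (fun x : Int => x) false).filter p).reverse := by
  apply PySem.List.sorted_rev_eq_of_perm_of_pairwise_gt
  · exact (List.reverse_perm _).trans
      ((PySem.List.sorted_perm (PySem.Set.ofList arr) (fun x : Int => x) false).filter p)
  · exact List.pairwise_reverse.mpr ((PySem.List.sorted_ofList_pairwise_lt arr).filter p)

-- sorted2 with integer key components is sorted with the lexicographic pair key.
theorem pv_sorted2_eq_sorted_lex (xs : List Int) (k1 k2 : Int → Int) :
    PySem.List.sorted2 xs k1 k2 false
    = PySem.List.sorted xs (fun x => toLex (k1 x, k2 x)) false := by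
  rw [PySem.List.sorted_eq_foldl_insertBy]
  unfold PySem.List.sorted2
  simp only [if_neg (by decide : ¬ (false = true))]
  congr 1
  funext acc x
  congr 1
  funext a b
  rcases lt_trichotomy (k1 a) (k1 b) with h | h | h <;>
    simp [Prod.Lex.lt_iff, h, not_lt.mpr h.le] <;> omega

-- The composite-key sort of the deduped set IS "evens ascending ++ odds descending".
theorem pv_key_sorted (arr : List Int) :
    PySem.List.sorted (PySem.Set.ofList arr)
      (fun x => toLex (PySem.Int.mod x 2, if PySem.Int.mod x 2 ≠ 0 then -x else x)) false
    = (PySem.List.sorted (PySem.Set.ofList arr) (fun x : Int => x) false).filter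
        (fun x => decide (PySem.Int.mod x 2 = 0))
      ++ ((PySem.List.sorted (PySem.Set.ofList arr) (fun x : Int => x) false).filter
        (fun x => decide (PySem.Int.mod x 2 ≠ 0))).reverse := by
  set s := PySem.List.sorted (PySem.Set.ofList arr) (fun x : Int => x) false with hs
  have hsp : s.Pairwise (· < ·) := PySem.List.sorted_ofList_pairwise_lt arr
  have hmod : ∀ x : Int, PySem.Int.mod x 2 = x % 2 := fun x =>
    PySem.Int.mod_eq_emod_of_pos (by norm_num)
  have hneg : (fun x : Int => decide (PySem.Int.mod x 2 ≠ 0))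
      = (fun x : Int => !decide (PySem.Int.mod x 2 = 0)) := by
    funext x
    rcases Int.emod_two_eq x with h | h <;> simp [hmod, h, Int.dvd_iff_emod_eq_zero]
  apply PySem.List.sorted_eq_of_perm_of_pairwise_lt
  · -- permutation: evens ++ reverse odds ~ set(arr)
    refine ((List.Perm.append (List.Perm.refl _) (List.reverse_perm _)).trans ?_)
    rw [hneg]
    exact (List.filter_append_perm _ s).trans
      (PySem.List.sorted_perm (PySem.Set.ofList arr) (fun x : Int => x) false)
  · -- strictly increasing composite keys along evens ++ reverse odds
    rw [List.pairwise_append]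
    refine ⟨?_, ?_, ?_⟩
    · refine (hsp.filter _).imp_of_mem ?_
      intro a b ha hb hab
      have hpa : a % 2 = 0 := by simpa [hmod] using (List.mem_filter.mp ha).2
      have hpb : b % 2 = 0 := by simpa [hmod] using (List.mem_filter.mp hb).2
      simp [Prod.Lex.lt_iff, hpa, hpb, hab]
    · refine (List.pairwise_reverse.mpr (hsp.filter _)).imp_of_mem ?_
      intro a b ha hb hab
      have hpa : ¬ a % 2 = 0 := by
        simpa [hmod] using (List.mem_filter.mp (List.mem_reverse.mp ha)).2
      have hpb : ¬ b % 2 = 0 := by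
        simpa [hmod] using (List.mem_filter.mp (List.mem_reverse.mp hb)).2
      have h1a : a % 2 = 1 := by rcases Int.emod_two_eq a with h | h <;> omega
      have h1b : b % 2 = 1 := by rcases Int.emod_two_eq b with h | h <;> omega
      simp [Prod.Lex.lt_iff, h1a, h1b]
      omega
    · intro a ha b hb
      have hpa : a % 2 = 0 := by simpa [hmod] using (List.mem_filter.mp ha).2
      have hpb : ¬ b % 2 = 0 := by
        simpa [hmod] using (List.mem_filter.mp (List.mem_reverse.mp hb)).2
      have h1b : b % 2 = 1 := by rcases Int.emod_two_eq b with h | h <;> omega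
      simp [Prod.Lex.lt_iff, hpa, h1b]

-- ===== VERDICT (by name: the statement is the Claim_ definition above) =====
theorem men_from_boys_spec : Claim_equal_men_from_boys := by
  intro arr _
  show men_from_boys arr = men_from_boys_alt arr
  unfold men_from_boys men_from_boys_alt
  dsimp only
  rw [pv_fold_pair, pv_sorted2_eq_sorted_lex]
  simp only [List.nil_append]
  rw [pv_sorted_filter, pv_sorted_rev_filter, pv_key_sorted]
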